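-- pv_equiv track=rewrite | github.com/Khamar-Uz-Zama/Master-Thesis | Optical Flow/D_Create_Observers.py | create_patches
-- ===== SOURCE A (Python) =====
-- size_of_patch = 15 # must be odd
--
-- def create_patches(centers):
--     patches = []
--
--     for center in centers:
--         patchx = []
--         patchy = []
--
--         startX = int(center[0]-int(size_of_patch/2))
--         startY = int(center[1]-int(size_of_patch/2))
--
--         endX = int(center[0]+int(size_of_patch/2))
--         endY = int(center[1]+int(size_of_patch/2))
--         for y in range(startY, endY+1):
--             for x in range(startX, endX+1):
--                 patchx.append(x)
--                 patchy.append(y)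
--         patch = (patchx,patchy)
--         patches.append(patch)
--
--     return patches
-- ===== SOURCE B (Python) =====
-- size_of_patch = 15 # must be odd
--
-- # Precomputed offset template for the flattened 15x15 grid: cell i has
-- # x-offset i % 15 - 7 and y-offset i // 15 - 7.  Each patch is just this
-- # constant template translated by its center.
-- _half = int(size_of_patch / 2)
-- _DX = [i % size_of_patch - _half for i in range(size_of_patch * size_of_patch)]
-- _DY = [i // size_of_patch - _half for i in range(size_of_patch * size_of_patch)]
--
-- def create_patches(centers):
--     return [([cx + dx for dx in _DX], [cy + dy for dy in _DY])
--             for cx, cy in centers]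
-- ===== Notes on version B (the rewrite author's own statement) =====
-- stated objective: alternative
-- what changed: Replaces A's per-center nested y/x range loops with a precomputed 225-cell offset template (x-offset i%15-7, y-offset i//15-7 over a single flat index) that is translated by each center, so per center there is one flat pass adding a constant instead of generating a fresh 2D grid.
import Mathlib
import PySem

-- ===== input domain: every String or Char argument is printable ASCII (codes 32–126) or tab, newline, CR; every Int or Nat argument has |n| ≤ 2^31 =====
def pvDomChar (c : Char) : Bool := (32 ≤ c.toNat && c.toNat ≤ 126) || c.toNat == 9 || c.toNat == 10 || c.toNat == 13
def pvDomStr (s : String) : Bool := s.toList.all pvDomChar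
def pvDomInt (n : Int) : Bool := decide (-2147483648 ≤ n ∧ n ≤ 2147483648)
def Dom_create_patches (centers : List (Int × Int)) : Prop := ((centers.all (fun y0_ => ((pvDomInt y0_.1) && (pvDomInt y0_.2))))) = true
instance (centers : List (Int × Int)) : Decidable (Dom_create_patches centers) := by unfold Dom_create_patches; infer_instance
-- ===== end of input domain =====

-- B replaces A's per-center nested y/x range loops by a precomputed 225-cell offset template (i%15-7, i//15-7) translated by each center (objective: alternative).


-- ===== PORT A =====
-- literal transliteration of A: interleaved nested append loop per center.
-- int(15/2) = 7 (Python float division then truncation) is written as the literal 7.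
def create_patches (centers : List (Int × Int)) : List (List Int × List Int) :=
  centers.foldl (fun patches center =>
    let startX : Int := center.1 - 7
    let startY : Int := center.2 - 7
    let endX : Int := center.1 + 7
    let endY : Int := center.2 + 7
    let p : List Int × List Int :=
      (PySem.List.pyRange startY (endY + 1) 1).foldl (fun p y =>
        (PySem.List.pyRange startX (endX + 1) 1).foldl
          (fun q x => (q.1 ++ [x], q.2 ++ [y])) p) ([], [])
    patches ++ [p]) []

-- ===== PORT B =====
-- transliteration of Source B: the constant offset template _DX/_DY over the flat
-- index range(225), translated by each center.
def pvDX : List Int :=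
  (PySem.List.pyRange 0 (15 * 15) 1).map (fun i => PySem.Int.mod i 15 - 7)
def pvDY : List Int :=
  (PySem.List.pyRange 0 (15 * 15) 1).map (fun i => PySem.Int.floordiv i 15 - 7)

def create_patches_alt (centers : List (Int × Int)) : List (List Int × List Int) :=
  centers.map (fun c =>
    (pvDX.map (fun dx => c.1 + dx), pvDY.map (fun dy => c.2 + dy)))

-- ===== PRECONDITION & SPEC =====
def Spec_create_patches (centers : List (Int × Int)) (out : List (List Int × List Int)) : Prop := out = create_patches_alt centers
instance (centers : List (Int × Int)) (out : List (List Int × List Int)) : Decidable (Spec_create_patches centers out) := by unfold Spec_create_patches; infer_instance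

-- ===== CLAIM (what is proved, stated in full; the proofs are below) =====
def Claim_equal_create_patches : Prop := ∀ (centers : List (Int × Int)), Dom_create_patches centers → Spec_create_patches centers (create_patches centers)

-- ===== LEMMAS AND PROOFS =====

-- A's inner x-loop appends xs to patchx and |xs| copies of y to patchy.
theorem pv_inner (xs : List Int) (y : Int) : ∀ (p : List Int × List Int),
    xs.foldl (fun (q : List Int × List Int) x => (q.1 ++ [x], q.2 ++ [y])) p
      = (p.1 ++ xs, p.2 ++ List.replicate xs.length y) := by
  induction xs with
  | nil => simp
  | cons x xs ih =>
      intro p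
      simp only [List.foldl_cons, ih, List.length_cons]
      simp [List.replicate_succ, List.append_assoc]

-- A's nested loop per center: xs tiled |ys| times, each y repeated |xs| times.
theorem pv_nested (xs : List Int) : ∀ (ys : List Int) (p : List Int × List Int),
    ys.foldl (fun (p : List Int × List Int) y =>
        xs.foldl (fun (q : List Int × List Int) x => (q.1 ++ [x], q.2 ++ [y])) p) p
      = (p.1 ++ (List.replicate ys.length xs).flatten,
         p.2 ++ ys.flatMap (fun y => List.replicate xs.length y)) := by
  intro ys
  induction ys with
  | nil => simp
  | cons y ys ih =>
      intro p
      rw [List.foldl_cons, pv_inner, ih]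
      simp [List.replicate_succ, List.append_assoc]

theorem pv_foldl_append_map {α β : Type} (f : α → β) : ∀ (l : List α) (acc : List β),
    l.foldl (fun ps c => ps ++ [f c]) acc = acc ++ l.map f := by
  intro l
  induction l with
  | nil => simp
  | cons c l ih => intro acc; simp [ih]

-- range(a, a+15) is the base 15-range translated by a.
theorem pv_range15 (a : Int) :
    PySem.List.pyRange a (a + 15) 1 = (List.range 15).map (fun k => a + (k : Int)) := by
  have h : a + 15 - a = (15 : Int) := by ring
  rw [PySem.List.pyRange_one, h]
  rfl

-- the concrete x-template: pvDX is the 15-row tiled 15 times.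
set_option maxRecDepth 10000 in
theorem pv_DX_eq :
    pvDX = (List.replicate 15 ((List.range 15).map (fun k => (k : Int) - 7))).flatten := by
  decide

-- the concrete y-template: pvDY is each of the 15 offsets repeated 15 times.
set_option maxRecDepth 10000 in
theorem pv_DY_eq :
    pvDY = ((List.range 15).map (fun k => (k : Int) - 7)).flatMap
      (fun d => List.replicate 15 d) := by
  decide

-- ===== VERDICT (by name: the statement is the Claim_ definition above) =====
theorem create_patches_spec : Claim_equal_create_patches := by
  intro centers _
  unfold Spec_create_patches create_patches create_patches_alt
  rw [pv_foldl_append_map]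
  simp only [List.nil_append]
  congr 1
  funext c
  have h1 : c.1 + 7 + 1 = (c.1 - 7) + 15 := by ring
  have h2 : c.2 + 7 + 1 = (c.2 - 7) + 15 := by ring
  simp only [h1, h2, pv_nested, List.nil_append]
  rw [pv_range15 (c.1 - 7), pv_range15 (c.2 - 7), pv_DX_eq, pv_DY_eq]
  simp only [List.length_map, Prod.mk.injEq]
  constructor
  · simp only [List.map_flatten, List.map_replicate, List.map_map]
    congr 2
    apply List.map_congr_left
    intro k _
    simp only [Function.comp_apply]
    ring
  · simp only [List.map_flatMap, List.flatMap_map, List.map_replicate]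
    apply List.flatMap_congr
    intro k _
    congr 1
    ring
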